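-- pv_equiv track=rewrite | github.com/sixplusgroup/dialog | emotion_backend/case_generation_evaluation/case_evaluation.py | get_customer_audio_score
-- ===== SOURCE A (Python) =====
-- def get_customer_audio_score(customer_audio_emotions):
--     score = 80
--     pessimistic_num = 0
--     optimistic_num = 0
--     for emotion in customer_audio_emotions:
--         if emotion == 'angry':
--             pessimistic_num += 1
--             score -= 10
--         elif emotion == 'sad':
--             pessimistic_num += 1
--             score -= 5
--         elif emotion == 'happy':
--             optimistic_num += 1
--             score += 3
--     return score, pessimistic_num, optimistic_num
-- ===== SOURCE B (Python) =====
-- def get_customer_audio_score(customer_audio_emotions):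
--     a = customer_audio_emotions.count('angry')
--     s = customer_audio_emotions.count('sad')
--     h = customer_audio_emotions.count('happy')
--     return 80 - 10 * a - 5 * s + 3 * h, a + s, h
-- ===== Notes on version B (the rewrite author's own statement) =====
-- stated objective: idiomatic
-- what changed: Replaces A's single accumulating pass with per-element if/elif branching by three staged library count passes (one per known emotion) followed by a closed-form arithmetic computation of score and both counters; no hand-written loop or branching remains.
import Mathlib
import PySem

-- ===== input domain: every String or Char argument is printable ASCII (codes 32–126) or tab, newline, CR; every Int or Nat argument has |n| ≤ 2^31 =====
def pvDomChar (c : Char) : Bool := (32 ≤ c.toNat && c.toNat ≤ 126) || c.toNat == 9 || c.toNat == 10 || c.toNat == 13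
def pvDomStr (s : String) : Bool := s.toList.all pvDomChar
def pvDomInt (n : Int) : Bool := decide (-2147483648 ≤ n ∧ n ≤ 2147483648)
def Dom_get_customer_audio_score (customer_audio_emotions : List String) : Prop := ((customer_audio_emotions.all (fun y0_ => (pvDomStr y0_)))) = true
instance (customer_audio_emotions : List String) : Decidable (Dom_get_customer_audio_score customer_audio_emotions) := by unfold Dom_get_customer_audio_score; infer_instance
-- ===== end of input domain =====

-- B replaces A's accumulating if/elif pass by three staged library count passes and a
-- closed-form arithmetic computation from the three counts (objective: idiomatic).

-- ===== PORT A =====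
-- the body of A's loop: one if/elif step updating (score, pessimistic_num, optimistic_num)
def pvStepA (st : Int × Int × Int) (emotion : String) : Int × Int × Int :=
  let (score, pessimistic_num, optimistic_num) := st
  if emotion == "angry" then (score - 10, pessimistic_num + 1, optimistic_num)
  else if emotion == "sad" then (score - 5, pessimistic_num + 1, optimistic_num)
  else if emotion == "happy" then (score + 3, pessimistic_num, optimistic_num + 1)
  else (score, pessimistic_num, optimistic_num)

-- literal transliteration of A's single accumulating loop
def get_customer_audio_score (customer_audio_emotions : List String) : Int × Int × Int :=
  customer_audio_emotions.foldl pvStepA (80, 0, 0)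

-- ===== PORT B =====
-- literal transliteration of B: three list.count passes, then closed-form arithmetic
def get_customer_audio_score_alt (customer_audio_emotions : List String) : Int × Int × Int :=
  let a := PySem.List.count customer_audio_emotions "angry"
  let s := PySem.List.count customer_audio_emotions "sad"
  let h := PySem.List.count customer_audio_emotions "happy"
  (80 - 10 * a - 5 * s + 3 * h, a + s, h)

-- ===== PRECONDITION & SPEC =====
def Spec_get_customer_audio_score (customer_audio_emotions : List String) (out : Int × Int × Int) : Prop := out = get_customer_audio_score_alt customer_audio_emotions
instance (customer_audio_emotions : List String) (out : Int × Int × Int) : Decidable (Spec_get_customer_audio_score customer_audio_emotions out) := by unfold Spec_get_customer_audio_score; infer_instance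

-- ===== CLAIM (what is proved, stated in full; the proofs are below) =====
def Claim_equal_get_customer_audio_score : Prop := ∀ (customer_audio_emotions : List String), Dom_get_customer_audio_score customer_audio_emotions → Spec_get_customer_audio_score customer_audio_emotions (get_customer_audio_score customer_audio_emotions)

-- ===== LEMMAS AND PROOFS =====

-- A's fold, from any initial state, adds the count-based deltas.
lemma foldA_counts (xs : List String) (sc p o : Int) :
    xs.foldl pvStepA (sc, p, o)
    = (sc - 10 * (xs.count "angry" : Int) - 5 * (xs.count "sad" : Int) + 3 * (xs.count "happy" : Int),
       p + (xs.count "angry" : Int) + (xs.count "sad" : Int),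
       o + (xs.count "happy" : Int)) := by
  induction xs generalizing sc p o with
  | nil => simp
  | cons x xs ih =>
    rw [List.foldl_cons]
    simp only [List.count_cons]
    by_cases hx : x = "angry"
    · subst hx; simp only [pvStepA, beq_self_eq_true, if_true, ih]
      refine Prod.ext ?_ (Prod.ext ?_ ?_) <;> simp <;> ring
    · by_cases hs : x = "sad"
      · subst hs; simp only [pvStepA]
        rw [if_neg (by decide), if_pos (by decide), ih]
        refine Prod.ext ?_ (Prod.ext ?_ ?_) <;> simp <;> ring
      · by_cases hh : x = "happy"
        · subst hh; simp only [pvStepA]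
          rw [if_neg (by decide), if_neg (by decide), if_pos (by decide), ih]
          refine Prod.ext ?_ (Prod.ext ?_ ?_) <;> simp <;> ring
        · simp only [pvStepA]
          rw [if_neg (by simp [hx]), if_neg (by simp [hs]), if_neg (by simp [hh]), ih]
          simp [hx, hs, hh]

-- ===== VERDICT (by name: the statement is the Claim_ definition above) =====
theorem get_customer_audio_score_spec : Claim_equal_get_customer_audio_score := by
  intro xs _
  unfold Spec_get_customer_audio_score get_customer_audio_score get_customer_audio_score_alt
  simp only [foldA_counts, PySem.List.count_eq]
  simp
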